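-- pv_equiv track=rewrite | github.com/ABorgna/metnum | src/exp/generador_grafos.py | generar_grafo_estrellas_unidas_hacia_adentro
-- ===== SOURCE A (Python) =====
-- def generar_grafo_trivial(n):
--     """Genera grafo de n vertices aislados en forma de matriz de adyacencias"""
--     return [[0]*n for i in range(0, n)]
--
-- def agregar_grafo_estrella_hacia_adentro(matriz, n=-1, inicio_index=0):
--     """Agrega a la matriz un grafo estrella dirigido cuyos nodos son [inicio_index, inicio_index+1,..., inicio_index+n-1],
--     todos apuntando al nodo 'inicio_index'
--     """
--     if n == -1:
--         n = len(matriz)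
--
--     for i in range(1, n):
--         matriz[inicio_index + i][inicio_index] = 1
--
--     return matriz
--
-- def generar_grafo_estrellas_unidas_hacia_adentro(cant_estrellas, cant_nodos_por_estrella):
--     """ Genera 'cant_estrellas' grafos estrellas hacia adentro, de 'cant_nodos_por_estrella' cada uno y
--     agrega un nuevo eje desde el centro de cada estrella hacia un nuevo nodo central
--     """
--     n = cant_estrellas * cant_nodos_por_estrella + 1
--     m = generar_grafo_trivial(n)
--
--     # agrego grafos estrella
--     inicio_index = 0
--     for i in range(0, cant_estrellas):
--         agregar_grafo_estrella_hacia_adentro(m, cant_nodos_por_estrella, inicio_index)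
--         inicio_index += cant_nodos_por_estrella
--
--     # uno los centros {0, cant_nodos_por_estrella, 2*cant_nodos_por_estrella,...} al ultimo nodo
--     for i in range(0, n-1, cant_nodos_por_estrella):
--         m[i][n-1] = 1
--
--     return m
-- ===== SOURCE B (Python) =====
-- def generar_grafo_estrellas_unidas_hacia_adentro(cant_estrellas, cant_nodos_por_estrella):
--     """Single dense per-cell pass: cell (i, j) is 1 exactly when the joined
--     inward-star graph has an edge i -> j."""
--     s = cant_estrellas
--     k = cant_nodos_por_estrella
--     n = s * k + 1
--
--     def cell(i, j):
--         if i < s * k and i % k != 0: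
--             # satellite node: points to the center of its star
--             return 1 if j == (i // k) * k else 0
--         if i < s * k:
--             # star center: points to the new global center n-1
--             return 1 if j == n - 1 else 0
--         return 0
--
--     return [[cell(i, j) for j in range(n)] for i in range(n)]
-- ===== Notes on version B (the rewrite author's own statement) =====
-- stated objective: alternative
-- what changed: A allocates a zero matrix and then mutates it with two imperative update loops (per-star inner loop plus a strided center loop); B is a single dense per-cell comprehension computing each entry directly from a closed-form edge predicate (satellite i points to (i//k)*k, center i points to n-1).
-- outside the precondition, e.g. on generar_grafo_estrellas_unidas_hacia_adentro(-1, -1): A returns [[0, 0], [0, 0]], B returns [[0, 1], [0, 0]]; on generar_grafo_estrellas_unidas_hacia_adentro(1, 0): A raises ValueError, B returns [[0]]; on generar_grafo_estrellas_unidas_hacia_adentro(2, -3): A raises IndexError, B returns []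
import Mathlib
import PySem

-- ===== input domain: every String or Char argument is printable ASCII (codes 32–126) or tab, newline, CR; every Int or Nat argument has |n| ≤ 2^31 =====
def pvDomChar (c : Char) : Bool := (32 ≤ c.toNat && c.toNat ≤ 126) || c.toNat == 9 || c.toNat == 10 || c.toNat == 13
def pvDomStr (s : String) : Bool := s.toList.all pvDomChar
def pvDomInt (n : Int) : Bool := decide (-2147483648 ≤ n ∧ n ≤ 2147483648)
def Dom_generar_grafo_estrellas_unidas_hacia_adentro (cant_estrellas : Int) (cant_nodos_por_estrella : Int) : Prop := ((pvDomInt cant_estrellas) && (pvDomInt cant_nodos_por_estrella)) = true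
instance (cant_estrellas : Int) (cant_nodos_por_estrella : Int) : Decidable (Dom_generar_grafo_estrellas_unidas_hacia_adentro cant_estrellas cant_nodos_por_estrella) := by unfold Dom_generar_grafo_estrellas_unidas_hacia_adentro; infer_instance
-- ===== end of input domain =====

-- B replaces A's zero matrix + two imperative update loops by one dense per-cell
-- comprehension with a closed-form edge predicate (objective: alternative decomposition).

-- ===== PORT A =====
def generar_grafo_trivial (n : Int) : List (List Int) :=
  (PySem.List.pyRange 0 n 1).map (fun _ => PySem.List.pyRepeat [0] n)

-- 'matriz[i][j] = 1' is ported by hand as nested pySetD/pyGetD; pySetD/pyGetD are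
-- exact where the indices are in range, which holds on every input admitted by Pre_.
def agregar_grafo_estrella_hacia_adentro (matriz : List (List Int)) (n : Int) (inicio_index : Int) : List (List Int) :=
  let n2 := if n = -1 then (matriz.length : Int) else n
  (PySem.List.pyRange 1 n2 1).foldl
    (fun m i =>
      PySem.List.pySetD m (inicio_index + i)
        (PySem.List.pySetD (PySem.List.pyGetD m (inicio_index + i) []) inicio_index 1))
    matriz

def generar_grafo_estrellas_unidas_hacia_adentro (cant_estrellas : Int) (cant_nodos_por_estrella : Int) : List (List Int) :=
  let n := cant_estrellas * cant_nodos_por_estrella + 1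
  let m := generar_grafo_trivial n
  let st := (PySem.List.pyRange 0 cant_estrellas 1).foldl
    (fun (st : List (List Int) × Int) _ =>
      (agregar_grafo_estrella_hacia_adentro st.1 cant_nodos_por_estrella st.2,
       st.2 + cant_nodos_por_estrella))
    (m, 0)
  (PySem.List.pyRange 0 (n - 1) cant_nodos_por_estrella).foldl
    (fun m i =>
      PySem.List.pySetD m i
        (PySem.List.pySetD (PySem.List.pyGetD m i []) (n - 1) 1))
    st.1

-- ===== PORT B =====
def pvCell (s k n i j : Int) : Int :=
  if i < s * k ∧ PySem.Int.mod i k ≠ 0 then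
    (if j = PySem.Int.floordiv i k * k then 1 else 0)
  else if i < s * k then
    (if j = n - 1 then 1 else 0)
  else 0

def generar_grafo_estrellas_unidas_hacia_adentro_alt (cant_estrellas : Int) (cant_nodos_por_estrella : Int) : List (List Int) :=
  let n := cant_estrellas * cant_nodos_por_estrella + 1
  (PySem.List.pyRange 0 n 1).map (fun i =>
    (PySem.List.pyRange 0 n 1).map (fun j =>
      pvCell cant_estrellas cant_nodos_por_estrella n i j))

-- ===== PRECONDITION & SPEC =====
-- Pre_ restricts to the natural domain of a positive star size (plus the harmless
-- zero-star case): for cant_nodos_por_estrella = 0 A raises ValueError (range step 0),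
-- for negative values with cant_estrellas > 0 it raises IndexError, and for negative
-- values with cant_estrellas < 0 A's all-zero n×n matrix is an accident of both of its
-- update loops being empty on nonsensical negative sizes.
def Pre_generar_grafo_estrellas_unidas_hacia_adentro (cant_estrellas : Int) (cant_nodos_por_estrella : Int) : Prop :=
  0 < cant_nodos_por_estrella ∨ (cant_estrellas = 0 ∧ cant_nodos_por_estrella ≠ 0)
instance (cant_estrellas : Int) (cant_nodos_por_estrella : Int) : Decidable (Pre_generar_grafo_estrellas_unidas_hacia_adentro cant_estrellas cant_nodos_por_estrella) := by unfold Pre_generar_grafo_estrellas_unidas_hacia_adentro; infer_instance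

def pvWitness_generar_grafo_estrellas_unidas_hacia_adentro : Int × Int := (2, 3)

def Spec_generar_grafo_estrellas_unidas_hacia_adentro (cant_estrellas : Int) (cant_nodos_por_estrella : Int) (out : List (List Int)) : Prop := out = generar_grafo_estrellas_unidas_hacia_adentro_alt cant_estrellas cant_nodos_por_estrella
instance (cant_estrellas : Int) (cant_nodos_por_estrella : Int) (out : List (List Int)) : Decidable (Spec_generar_grafo_estrellas_unidas_hacia_adentro cant_estrellas cant_nodos_por_estrella out) := by unfold Spec_generar_grafo_estrellas_unidas_hacia_adentro; infer_instance

-- ===== CLAIM (what is proved, stated in full; the proofs are below) =====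
def Claim_equal_generar_grafo_estrellas_unidas_hacia_adentro : Prop := ∀ (cant_estrellas : Int) (cant_nodos_por_estrella : Int), Dom_generar_grafo_estrellas_unidas_hacia_adentro cant_estrellas cant_nodos_por_estrella → Pre_generar_grafo_estrellas_unidas_hacia_adentro cant_estrellas cant_nodos_por_estrella → Spec_generar_grafo_estrellas_unidas_hacia_adentro cant_estrellas cant_nodos_por_estrella (generar_grafo_estrellas_unidas_hacia_adentro cant_estrellas cant_nodos_por_estrella)

-- ===== LEMMAS AND PROOFS =====

-- one write 'm[p.1][p.2] = 1'
def pvUpd (m : List (List Int)) (p : Int × Int) : List (List Int) :=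
  PySem.List.pySetD m p.1 (PySem.List.pySetD (PySem.List.pyGetD m p.1 []) p.2 1)

-- square shape invariant
def pvShape (n : Nat) (m : List (List Int)) : Prop :=
  m.length = n ∧ ∀ r ∈ m, r.length = n

def pvInRange (n : Nat) (p : Int × Int) : Prop :=
  0 ≤ p.1 ∧ p.1 < (n : Int) ∧ 0 ≤ p.2 ∧ p.2 < (n : Int)

def pvEntry (m : List (List Int)) (a b : Nat) : Int := (m.getD a []).getD b 0

-- the writes of the star whose top-left node is 'inicio'
def pvStarUpds (k inicio : Int) : List (Int × Int) :=
  (PySem.List.pyRange 1 k 1).map (fun i => (inicio + i, inicio))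

-- all star writes
def pvSL (s k : Int) : List (Int × Int) :=
  (List.range s.toNat).flatMap (fun (j : Nat) => pvStarUpds k ((j : Int) * k))

-- all center writes
def pvCL (s k : Int) : List (Int × Int) :=
  (PySem.List.pyRange 0 (s * k) k).map (fun i => (i, s * k))

theorem pv_getD_set_eq {α : Type} (l : List α) (x : Nat) (r d : α) (hx : x < l.length) :
    (l.set x r).getD x d = r := by
  rw [List.getD_eq_getElem _ _ (by simpa using hx)]
  exact List.getElem_set_self _

theorem pv_getD_set_ne {α : Type} (l : List α) (x a : Nat) (r d : α) (h : a ≠ x) :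
    (l.set x r).getD a d = l.getD a d := by
  by_cases ha : a < l.length
  · rw [List.getD_eq_getElem _ _ (by simpa using ha), List.getD_eq_getElem _ _ ha,
        List.getElem_set_ne (by omega)]
  · rw [List.getD_eq_default _ _ (by simpa using Nat.le_of_not_lt ha),
        List.getD_eq_default _ _ (Nat.le_of_not_lt ha)]

theorem pvUpd_eq (m : List (List Int)) {p : Int × Int} (h1 : 0 ≤ p.1) (h3 : 0 ≤ p.2) :
    pvUpd m p = m.set p.1.toNat ((m.getD p.1.toNat []).set p.2.toNat 1) := by
  rw [pvUpd, PySem.List.pyGetD_of_nonneg _ _ h1, PySem.List.pySetD_of_nonneg _ _ h3,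
      PySem.List.pySetD_of_nonneg _ _ h1]

theorem pvShape_upd {n : Nat} {m : List (List Int)} (h : pvShape n m) {p : Int × Int}
    (hp : pvInRange n p) : pvShape n (pvUpd m p) := by
  unfold pvShape at h ⊢
  unfold pvInRange at hp
  obtain ⟨hl, hr⟩ := h
  obtain ⟨h1, h2, h3, h4⟩ := hp
  rw [pvUpd_eq m h1 h3]
  have hx : p.1.toNat < m.length := by omega
  refine ⟨by simp [hl], ?_⟩
  intro r hrm
  rcases List.mem_or_eq_of_mem_set hrm with hmem | hset
  · exact hr r hmem
  · subst hset
    rw [List.length_set]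
    exact hr _ (List.getD_eq_getElem _ _ hx ▸ List.getElem_mem hx)

theorem pvEntry_upd {n : Nat} {m : List (List Int)} (hm : pvShape n m) {p : Int × Int}
    (hp : pvInRange n p) {a b : Nat} (ha : a < n) (hb : b < n) :
    pvEntry (pvUpd m p) a b =
      if ((a : Int) = p.1 ∧ (b : Int) = p.2) then 1 else pvEntry m a b := by
  unfold pvShape at hm
  unfold pvInRange at hp
  obtain ⟨hl, hr⟩ := hm
  obtain ⟨h1, h2, h3, h4⟩ := hp
  rw [pvUpd_eq m h1 h3]
  have hx : p.1.toNat < m.length := by omega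
  have hrowmem : m.getD p.1.toNat [] ∈ m :=
    List.getD_eq_getElem _ _ hx ▸ List.getElem_mem hx
  have hrlen : (m.getD p.1.toNat []).length = n := hr _ hrowmem
  unfold pvEntry
  by_cases hap : a = p.1.toNat
  · subst hap
    rw [pv_getD_set_eq _ _ _ _ hx]
    by_cases hbp : b = p.2.toNat
    · subst hbp
      rw [pv_getD_set_eq _ _ _ _ (by omega)]
      rw [if_pos ⟨by omega, by omega⟩]
    · rw [pv_getD_set_ne _ _ _ _ _ hbp, if_neg (by rintro ⟨hc1, hc2⟩; omega)]
  · rw [pv_getD_set_ne _ _ _ _ _ hap, if_neg (by rintro ⟨hc1, hc2⟩; omega)]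

theorem pvShape_foldl {n : Nat} {L : List (Int × Int)} :
    ∀ {m : List (List Int)}, pvShape n m → (∀ p ∈ L, pvInRange n p) →
    pvShape n (L.foldl pvUpd m) := by
  induction L with
  | nil => intro m hm _; simpa using hm
  | cons p L ih =>
    intro m hm hL
    simp only [List.foldl_cons]
    exact ih (pvShape_upd hm (hL p (by simp))) (fun q hq => hL q (by simp [hq]))

theorem pvEntry_foldl {n : Nat} {L : List (Int × Int)} :
    ∀ {m : List (List Int)}, pvShape n m → (∀ p ∈ L, pvInRange n p) →
    ∀ {a b : Nat}, a < n → b < n →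
    pvEntry (L.foldl pvUpd m) a b =
      if ((a : Int), (b : Int)) ∈ L then 1 else pvEntry m a b := by
  induction L with
  | nil => intro m _ _ a b _ _; simp
  | cons p L ih =>
    intro m hm hL a b ha hb
    simp only [List.foldl_cons]
    rw [ih (pvShape_upd hm (hL p (by simp))) (fun q hq => hL q (by simp [hq])) ha hb]
    rw [pvEntry_upd hm (hL p (by simp)) ha hb]
    by_cases h1 : ((a : Int), (b : Int)) ∈ L
    · simp [h1]
    · by_cases h2 : ((a : Int), (b : Int)) = p
      · have hcomp : (a : Int) = p.1 ∧ (b : Int) = p.2 := by rw [← h2]; exact ⟨rfl, rfl⟩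
        simp [h1, h2, hcomp]
      · have hcomp : ¬((a : Int) = p.1 ∧ (b : Int) = p.2) := by
          rintro ⟨hc1, hc2⟩
          exact h2 (by obtain ⟨p1, p2⟩ := p; simp_all)
        simp [h1, h2, hcomp]

-- A's helper = applying the star's writes
theorem pvAgregar_eq (m : List (List Int)) (k inicio : Int) (hk : 0 < k) :
    agregar_grafo_estrella_hacia_adentro m k inicio = (pvStarUpds k inicio).foldl pvUpd m := by
  have hne : ¬(k = -1) := by omega
  simp only [agregar_grafo_estrella_hacia_adentro, hne, if_false, pvStarUpds,
    List.foldl_map, pvUpd]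

-- A's star loop = applying all star writes, while the cursor advances by k each turn
theorem pvStarPhase (k : Int) (hk : 0 < k) :
    ∀ (t : Nat) (m0 : List (List Int)) (i0 : Int),
    ((List.range t).foldl
        (fun (st : List (List Int) × Int) (_ : Nat) =>
          (agregar_grafo_estrella_hacia_adentro st.1 k st.2, st.2 + k)) (m0, i0)) =
      (((List.range t).flatMap (fun (j : Nat) => pvStarUpds k (i0 + (j : Int) * k))).foldl pvUpd m0,
        i0 + (t : Int) * k) := by
  intro t
  induction t with
  | zero => intro m0 i0; simp
  | succ t ih =>
    intro m0 i0
    rw [List.range_succ, List.foldl_append, ih m0 i0]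
    simp only [List.foldl_cons, List.foldl_nil, List.flatMap_append, List.flatMap_cons,
      List.flatMap_nil, List.append_nil, List.foldl_append]
    rw [pvAgregar_eq _ _ _ hk]
    simp only [Prod.mk.injEq]
    constructor
    · trivial
    · push_cast; ring

-- A as one list of writes
theorem pvA_eq_writes (s k : Int) (hk : 0 < k) (hs : 0 < s) :
    generar_grafo_estrellas_unidas_hacia_adentro s k =
      ((pvSL s k ++ pvCL s k).foldl pvUpd (generar_grafo_trivial (s * k + 1))) := by
  simp only [generar_grafo_estrellas_unidas_hacia_adentro]
  have h1 : PySem.List.pyRange 0 s 1 = (List.range s.toNat).map (fun (j : Nat) => (0 : Int) + (j : Int)) := by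
    rw [PySem.List.pyRange_one]
    norm_num
  rw [h1, List.foldl_map, pvStarPhase k hk s.toNat (generar_grafo_trivial (s * k + 1)) 0]
  have h2 : s * k + 1 - 1 = s * k := by ring
  rw [h2, List.foldl_append]
  simp only [zero_add, pvSL, pvCL, List.foldl_map, pvUpd]

-- the starting matrix
theorem pvShape_trivial (n : Int) : pvShape n.toNat (generar_grafo_trivial n) := by
  unfold pvShape
  constructor
  · simp [generar_grafo_trivial, PySem.List.length_pyRange_one]
  · intro r hr
    simp only [generar_grafo_trivial, List.mem_map] at hr
    obtain ⟨_, _, hr⟩ := hr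
    rw [← hr, PySem.List.pyRepeat_singleton, List.length_replicate]

theorem pvEntry_trivial (n : Int) {a b : Nat} (ha : a < n.toNat) (hb : b < n.toNat) :
    pvEntry (generar_grafo_trivial n) a b = 0 := by
  have hrepl : generar_grafo_trivial n = List.replicate n.toNat (List.replicate n.toNat 0) := by
    rw [generar_grafo_trivial]
    simp [PySem.List.pyRepeat_singleton, List.map_const', PySem.List.length_pyRange_one]
  rw [hrepl]
  unfold pvEntry
  rw [List.getD_replicate _ ha, List.getD_replicate _ hb]

-- membership characterisations of the write lists
theorem pvMem_SL (s k : Int) (p : Int × Int) :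
    p ∈ pvSL s k ↔ ∃ j : Nat, j < s.toNat ∧ ∃ i : Int, 1 ≤ i ∧ i < k ∧
      p = ((j : Int) * k + i, (j : Int) * k) := by
  simp only [pvSL, List.mem_flatMap, List.mem_range, pvStarUpds, List.mem_map,
    PySem.List.mem_pyRange_one]
  constructor
  · rintro ⟨j, hj, i, ⟨hi1, hi2⟩, rfl⟩
    exact ⟨j, hj, i, hi1, hi2, rfl⟩
  · rintro ⟨j, hj, i, hi1, hi2, rfl⟩
    exact ⟨j, hj, i, ⟨hi1, hi2⟩, rfl⟩

theorem pvMem_CL (s k : Int) (hk : 0 < k) (p : Int × Int) :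
    p ∈ pvCL s k ↔ ∃ i : Int, 0 ≤ i ∧ i < s * k ∧ k ∣ i ∧ p = (i, s * k) := by
  simp only [pvCL, List.mem_map, PySem.List.mem_pyRange_iff_of_pos hk]
  constructor
  · rintro ⟨i, ⟨hi1, hi2, hi3⟩, rfl⟩
    exact ⟨i, hi1, hi2, by simpa using hi3, rfl⟩
  · rintro ⟨i, hi1, hi2, hi3, rfl⟩
    exact ⟨i, ⟨hi1, hi2, by simpa using hi3⟩, rfl⟩

-- every write is inside the matrix
theorem pvWrites_inRange (s k : Int) (hk : 0 < k) (hs : 0 < s) :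
    ∀ p ∈ pvSL s k ++ pvCL s k, pvInRange (s * k + 1).toNat p := by
  intro p hp
  have hsk : 0 < s * k := by positivity
  have htn : ((s * k + 1).toNat : Int) = s * k + 1 := Int.toNat_of_nonneg (by omega)
  unfold pvInRange
  rcases List.mem_append.1 hp with h | h
  · rw [pvMem_SL s k] at h
    obtain ⟨j, hj, i, hi1, hi2, rfl⟩ := h
    have hj' : (j : Int) < s := by omega
    have hjk : (j : Int) * k + k ≤ s * k := by nlinarith
    have hj0 : (0 : Int) ≤ (j : Int) * k := by positivity
    refine ⟨by omega, by omega, by omega, by omega⟩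
  · rw [pvMem_CL s k hk] at h
    obtain ⟨i, hi1, hi2, _, rfl⟩ := h
    refine ⟨hi1, by omega, by omega, by omega⟩

-- the per-cell predicate classifies membership in the write list
set_option maxHeartbeats 1000000 in
theorem pvClassify (s k : Int) (hk : 0 < k) (hs : 0 < s) (a b : Int)
    (ha0 : 0 ≤ a) (ha : a < s * k + 1) (hb0 : 0 ≤ b) (hb : b < s * k + 1) :
    pvCell s k (s * k + 1) a b =
      if ((a, b) ∈ pvSL s k ++ pvCL s k) then 1 else 0 := by
  have hk0 : k ≠ 0 := by omega
  have hqr : k * (a / k) + a % k = a := Int.ediv_add_emod a k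
  have hqr' : a / k * k + a % k = a := by rw [mul_comm]; exact hqr
  have hks : k * s = s * k := mul_comm k s
  have hr0 : 0 ≤ a % k := Int.emod_nonneg a hk0
  have hrk : a % k < k := Int.emod_lt_of_pos a hk
  have hq0 : 0 ≤ a / k := Int.ediv_nonneg ha0 (by omega)
  have hSL : ((a, b) ∈ pvSL s k) ↔ (a % k ≠ 0 ∧ a < s * k ∧ b = a / k * k) := by
    rw [pvMem_SL s k]
    constructor
    · rintro ⟨j, hj, i, hi1, hi2, heq⟩
      rw [Prod.mk.injEq] at heq
      obtain ⟨hA, hB⟩ := heq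
      have hj' : (j : Int) < s := by omega
      have hA' : a = i + (j : Int) * k := by omega
      have hqj : a / k = (j : Int) := by
        rw [hA', Int.add_mul_ediv_right _ _ hk0, Int.ediv_eq_zero_of_lt (by omega) hi2]
        ring
      have hri : a % k = i := by
        rw [hA', Int.add_mul_emod_self_right]
        exact Int.emod_eq_of_lt (by omega) hi2
      have hmul : (j : Int) * k ≤ (s - 1) * k :=
        mul_le_mul_of_nonneg_right (by omega) (by omega)
      have hsub : (s - 1) * k = s * k - k := by ring
      refine ⟨by omega, by omega, by rw [hqj]; omega⟩
    · rintro ⟨hrne, hlt, hbq⟩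
      have hqs : a / k < s := lt_of_mul_lt_mul_left (by omega) (by omega : (0:Int) ≤ k)
      refine ⟨(a / k).toNat, by omega, a % k, by omega, hrk, ?_⟩
      rw [Prod.mk.injEq]
      have : ((a / k).toNat : Int) = a / k := Int.toNat_of_nonneg hq0
      refine ⟨by rw [this]; omega, by rw [this]; omega⟩
  have hCL : ((a, b) ∈ pvCL s k) ↔ (a % k = 0 ∧ a < s * k ∧ b = s * k) := by
    rw [pvMem_CL s k hk]
    constructor
    · rintro ⟨i, hi0, hilt, hdvd, heq⟩
      rw [Prod.mk.injEq] at heq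
      obtain ⟨hA, hB⟩ := heq
      subst hA
      exact ⟨Int.emod_eq_zero_of_dvd hdvd, hilt, hB⟩
    · rintro ⟨hr0', hlt, hbeq⟩
      exact ⟨a, ha0, hlt, Int.dvd_of_emod_eq_zero hr0', by rw [hbeq]⟩
  simp only [List.mem_append, hSL, hCL]
  unfold pvCell
  rw [PySem.Int.floordiv_eq_ediv_of_pos hk, PySem.Int.mod_eq_emod_of_pos hk]
  have h2 : s * k + 1 - 1 = s * k := by ring
  rw [h2]
  split_ifs <;> tauto

-- B's entries
theorem pvEntry_alt (s k : Int) (hn : 0 ≤ s * k + 1) {a b : Nat}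
    (ha : a < (s * k + 1).toNat) (hb : b < (s * k + 1).toNat) :
    pvEntry (generar_grafo_estrellas_unidas_hacia_adentro_alt s k) a b =
      pvCell s k (s * k + 1) a b := by
  have htn : ((s * k + 1).toNat : Int) = s * k + 1 := Int.toNat_of_nonneg hn
  have hcast : ∀ (X : List (List Int)), X.getD a [] = PySem.List.pyGetD X (a : Int) [] := by
    intro X
    rw [PySem.List.pyGetD_of_nonneg _ _ (Int.natCast_nonneg a), Int.toNat_natCast]
  have hcast2 : ∀ (X : List Int), X.getD b 0 = PySem.List.pyGetD X (b : Int) 0 := by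
    intro X
    rw [PySem.List.pyGetD_of_nonneg _ _ (Int.natCast_nonneg b), Int.toNat_natCast]
  simp only [generar_grafo_estrellas_unidas_hacia_adentro_alt]
  unfold pvEntry
  rw [hcast, PySem.List.pyGetD_map_pyRange_of_nonneg _ _ _ _ (Int.natCast_nonneg a) (by omega),
      hcast2, PySem.List.pyGetD_map_pyRange_of_nonneg _ _ _ _ (Int.natCast_nonneg b) (by omega)]

theorem pvShape_alt (s k : Int) :
    pvShape (s * k + 1).toNat (generar_grafo_estrellas_unidas_hacia_adentro_alt s k) := by
  unfold pvShape
  constructor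
  · simp [generar_grafo_estrellas_unidas_hacia_adentro_alt, PySem.List.length_pyRange_one]
  · intro r hr
    simp only [generar_grafo_estrellas_unidas_hacia_adentro_alt, List.mem_map] at hr
    obtain ⟨_, _, hr⟩ := hr
    rw [← hr]
    simp [PySem.List.length_pyRange_one]

-- two square matrices with equal entries are equal
theorem pvExt {n : Nat} {m1 m2 : List (List Int)} (h1 : pvShape n m1) (h2 : pvShape n m2)
    (h : ∀ a b : Nat, a < n → b < n → pvEntry m1 a b = pvEntry m2 a b) : m1 = m2 := by
  unfold pvShape at h1 h2
  obtain ⟨hl1, hr1⟩ := h1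
  obtain ⟨hl2, hr2⟩ := h2
  apply List.ext_getElem (by omega)
  intro a ha1 ha2
  have hrow1 : m1[a].length = n := hr1 _ (List.getElem_mem ha1)
  have hrow2 : m2[a].length = n := hr2 _ (List.getElem_mem ha2)
  apply List.ext_getElem (by omega)
  intro b hb1 hb2
  have hab := h a b (by omega) (by omega)
  unfold pvEntry at hab
  rwa [List.getD_eq_getElem _ _ ha1, List.getD_eq_getElem _ _ ha2,
       List.getD_eq_getElem _ _ hb1, List.getD_eq_getElem _ _ hb2] at hab

-- main case
theorem pvMain (s k : Int) (hk : 0 < k) (hs : 0 < s) :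
    generar_grafo_estrellas_unidas_hacia_adentro s k =
      generar_grafo_estrellas_unidas_hacia_adentro_alt s k := by
  have hsk : 0 < s * k := by positivity
  have hn : (0 : Int) ≤ s * k + 1 := by omega
  have htn : ((s * k + 1).toNat : Int) = s * k + 1 := Int.toNat_of_nonneg hn
  rw [pvA_eq_writes s k hk hs]
  apply pvExt (n := (s * k + 1).toNat)
    (pvShape_foldl (pvShape_trivial _) (pvWrites_inRange s k hk hs))
    (pvShape_alt s k)
  intro a b ha hb
  rw [pvEntry_foldl (pvShape_trivial _) (pvWrites_inRange s k hk hs) ha hb,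
      pvEntry_trivial _ ha hb, pvEntry_alt s k hn ha hb,
      pvClassify s k hk hs a b (by positivity) (by omega) (by positivity) (by omega)]

-- range(0, 0, k) is empty for every step (unfolding the primitive by hand; exact)
theorem pvRange00 (k : Int) : PySem.List.pyRange 0 0 k = [] := by
  unfold PySem.List.pyRange
  split_ifs <;> simp_all

-- degenerate case s = 0 (any nonzero k in Pre_; the port needs no condition on k)
theorem pvZero (k : Int) :
    generar_grafo_estrellas_unidas_hacia_adentro 0 k =
      generar_grafo_estrellas_unidas_hacia_adentro_alt 0 k := by
  simp only [generar_grafo_estrellas_unidas_hacia_adentro,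
    generar_grafo_estrellas_unidas_hacia_adentro_alt, generar_grafo_trivial]
  have e2 : (0 : Int) * k + 1 - 1 = 0 := by ring
  have e1 : (0 : Int) * k + 1 = 0 + 1 := by ring
  rw [e2, e1, pvRange00 k, PySem.List.pyRange_one_eq_nil (le_refl 0),
      PySem.List.pyRange_one_singleton]
  simp [pvCell, PySem.List.pyRepeat_singleton]

-- degenerate case s < 0 (with k > 0 everything is empty)
theorem pvNeg (s k : Int) (hk : 0 < k) (hs' : s < 0) :
    generar_grafo_estrellas_unidas_hacia_adentro s k =
      generar_grafo_estrellas_unidas_hacia_adentro_alt s k := by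
  simp only [generar_grafo_estrellas_unidas_hacia_adentro,
    generar_grafo_estrellas_unidas_hacia_adentro_alt, generar_grafo_trivial]
  have hstars : PySem.List.pyRange 0 s 1 = [] := PySem.List.pyRange_one_eq_nil (by omega)
  have hsk : s * k ≤ -1 := by nlinarith
  have h0 : PySem.List.pyRange 0 (s * k + 1) 1 = [] :=
    PySem.List.pyRange_one_eq_nil (by omega)
  have h1 : PySem.List.pyRange 0 (s * k + 1 - 1) k = [] := by
    rw [PySem.List.pyRange_of_pos _ _ hk, if_neg (by omega)]
    simp
  rw [hstars, h0, h1]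
  simp

-- ===== VERDICT (by name: the statement is the Claim_ definition above) =====
theorem generar_grafo_estrellas_unidas_hacia_adentro_spec : Claim_equal_generar_grafo_estrellas_unidas_hacia_adentro := by
  intro s k _ hpre
  unfold Spec_generar_grafo_estrellas_unidas_hacia_adentro
  unfold Pre_generar_grafo_estrellas_unidas_hacia_adentro at hpre
  rcases hpre with hk | ⟨hs0, _⟩
  · rcases lt_trichotomy s 0 with hs | hs | hs
    · exact pvNeg s k hk hs
    · subst hs; exact pvZero k
    · exact pvMain s k hk hs
  · subst hs0
    exact pvZero k
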